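-- pv_equiv track=rewrite | github.com/QueueAnd/CCPS109_109_problems | PythonProblems-main/PythonProblems-main/labs109.py | collapse_intervals
-- ===== SOURCE A (Python) =====
-- def collapse_intervals(items):
--     result_lists=[]
--     results=''
--     pointer=0
--     if len(items)==1:
--         return str(items[0])
--     for i in range(1, len(items)):
--         if items[i-1]!=items[i]-1:
--             result_lists.append(items[pointer:i])
--             pointer=i
--         if i==len(items)-1:
--             result_lists.append(items[pointer:])
--     for interval in result_lists:
--         if len(interval)>1:
--             results+=f'{interval[0]}-{interval[len(interval)-1]},'
--         else:
--             results+=f'{interval[0]},'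
--     return results[:-1]
-- ===== SOURCE B (Python) =====
-- def collapse_intervals(items):
--     if not items:
--         return ''
--     parts = []
--     start = prev = items[0]
--     for x in items[1:]:
--         if x != prev + 1:
--             parts.append(f'{start}-{prev}' if start != prev else f'{start}')
--             start = x
--         prev = x
--     parts.append(f'{start}-{prev}' if start != prev else f'{start}')
--     return ','.join(parts)
-- ===== Notes on version B (the rewrite author's own statement) =====
-- stated objective: simpler
-- what changed: Single pass tracking scalar start/prev that emits each part directly and joins with ',', instead of first building a list of interval sublists via index slicing and then a second formatting loop with a trailing-comma strip.
import Mathlib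
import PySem

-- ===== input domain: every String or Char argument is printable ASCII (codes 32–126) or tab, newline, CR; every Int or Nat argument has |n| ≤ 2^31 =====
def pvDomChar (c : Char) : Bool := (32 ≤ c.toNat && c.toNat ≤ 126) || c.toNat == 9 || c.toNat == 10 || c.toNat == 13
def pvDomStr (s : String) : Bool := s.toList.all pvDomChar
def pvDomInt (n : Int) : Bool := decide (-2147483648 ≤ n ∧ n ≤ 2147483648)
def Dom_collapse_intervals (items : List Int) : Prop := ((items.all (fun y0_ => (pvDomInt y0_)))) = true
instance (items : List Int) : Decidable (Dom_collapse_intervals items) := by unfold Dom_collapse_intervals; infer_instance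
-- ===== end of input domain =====

-- B replaces A's two-phase "collect interval sublists by slicing, then format with trailing-comma strip"
-- by a single pass over the elements tracking scalar start/prev, joined with ','  (objective: simpler).

-- ===== PORT A =====
-- the f-string body of A's second loop; the indexings interval[0] / interval[len(interval)-1] are
-- always in range in A (every appended slice is nonempty), so pyGetD with default 0 is exact here
def pvFmtA (interval : List Int) : String :=
  if interval.length > 1 then
    PySem.Int.toStr (PySem.List.pyGetD interval 0 0) ++ "-" ++
      PySem.Int.toStr (PySem.List.pyGetD interval ((interval.length : Int) - 1) 0) ++ ","
  else
    PySem.Int.toStr (PySem.List.pyGetD interval 0 0) ++ ","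

def collapse_intervals (items : List Int) : String :=
  if items.length == 1 then PySem.Int.toStr (PySem.List.pyGetD items 0 0)
  else
    -- first loop: for i in range(1, len(items)) over state (result_lists, pointer)
    let st := (PySem.List.pyRange 1 (items.length : Int) 1).foldl
      (fun (s : List (List Int) × Int) i =>
        let s1 := if PySem.List.pyGetD items (i - 1) 0 ≠ PySem.List.pyGetD items i 0 - 1
                  then (s.1 ++ [PySem.List.slice items (some s.2) (some i)], i)
                  else s
        if i == (items.length : Int) - 1
        then (s1.1 ++ [PySem.List.slice items (some s1.2) none], s1.2)
        else s1)
      ([], 0)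
    -- second loop: results += formatted interval, then results[:-1]
    let results := st.1.foldl (fun (r : String) interval => r ++ pvFmtA interval) ""
    PySem.Str.slice results none (some (-1))

-- ===== PORT B =====
-- the conditional f-string expression of Source B's append
def pvPartB (start prev : Int) : String :=
  if start ≠ prev then PySem.Int.toStr start ++ "-" ++ PySem.Int.toStr prev
  else PySem.Int.toStr start

def collapse_intervals_alt (items : List Int) : String :=
  match items with
  | [] => ""
  | x0 :: rest =>   -- rest = items[1:]
    let st := rest.foldl
      (fun (s : List String × Int × Int) x =>
        let s1 := if x ≠ s.2.2 + 1 then (s.1 ++ [pvPartB s.2.1 s.2.2], x) else (s.1, s.2.1)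
        (s1.1, s1.2, x))
      ([], x0, x0)
    PySem.Str.join "," (st.1 ++ [pvPartB st.2.1 st.2.2])

-- ===== PRECONDITION & SPEC =====
def Spec_collapse_intervals (items : List Int) (out : String) : Prop := out = collapse_intervals_alt items
instance (items : List Int) (out : String) : Decidable (Spec_collapse_intervals items out) := by unfold Spec_collapse_intervals; infer_instance

-- ===== CLAIM (what is proved, stated in full; the proofs are below) =====
def Claim_equal_collapse_intervals : Prop := ∀ (items : List Int), Dom_collapse_intervals items → Spec_collapse_intervals items (collapse_intervals items)

-- ===== LEMMAS AND PROOFS =====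

-- A's first-loop step without the 'i == len(items)-1' final-append branch
def pvStepA0 (items : List Int) (s : List (List Int) × Int) (i : Int) : List (List Int) × Int :=
  if PySem.List.pyGetD items (i - 1) 0 ≠ PySem.List.pyGetD items i 0 - 1
  then (s.1 ++ [PySem.List.slice items (some s.2) (some i)], i)
  else s

-- B's loop step, named for the proofs (identical to the lambda in the port)
def pvStepB (s : List String × Int × Int) (x : Int) : List String × Int × Int :=
  let s1 := if x ≠ s.2.2 + 1 then (s.1 ++ [pvPartB s.2.1 s.2.2], x) else (s.1, s.2.1)
  (s1.1, s1.2, x)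

-- A's formatting of a run slice equals B's scalar part (plus A's trailing comma)
lemma pvFmt_run (items : List Int) (p k : Nat) (hpk : p ≤ k) (hk : k < items.length)
    (hrun : items.getD k 0 = items.getD p 0 + ((k : Int) - (p : Int))) :
    pvFmtA ((items.drop p).take (k + 1 - p)) =
      pvPartB (items.getD p 0) (items.getD k 0) ++ "," := by
  set l := (items.drop p).take (k + 1 - p) with hl
  have hlen : l.length = k + 1 - p := by
    simp [hl, List.length_take, List.length_drop]; omega
  have h0 : PySem.List.pyGetD l 0 0 = items.getD p 0 := by
    rw [PySem.List.pyGetD_zero]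
    have : l[0]? = items[p]? := by
      rw [hl, List.getElem?_take_of_lt (by omega), List.getElem?_drop]
      simp
    rw [List.getD_eq_getElem?_getD, this, List.getD_eq_getElem?_getD]
  have hlast : PySem.List.pyGetD l ((l.length : Int) - 1) 0 = items.getD k 0 := by
    rw [PySem.List.pyGetD_eq_getElem l 0 (by omega) (by omega)]
    have ht : ((l.length : Int) - 1).toNat = k - p := by omega
    have : l[((l.length : Int) - 1).toNat]? = items[k]? := by
      rw [ht, hl, List.getElem?_take_of_lt (by omega), List.getElem?_drop]
      congr 1; omega
    have hk' : items[k]? = some (items.getD k 0) := by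
      rw [List.getD_eq_getElem?_getD, List.getElem?_eq_getElem hk]; simp
    have := this.trans hk'
    rw [List.getElem?_eq_getElem (by omega)] at this
    simpa using this
  by_cases hc : p < k
  · have hne : items.getD p 0 ≠ items.getD k 0 := by
      rw [hrun]; intro h; omega
    rw [pvFmtA, if_pos (by omega), pvPartB, if_pos hne, h0, hlast]
  · have hpe : p = k := by omega
    subst hpe
    rw [pvFmtA, if_neg (by omega), pvPartB, if_neg (by simp), h0]

-- joint invariant of A's first loop (final-append branch removed) and B's loop:
-- same closed runs (A as slices, B already formatted), pointer p starts the current run,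
-- and the current run is consecutive (items[k] = items[p] + (k - p))
lemma pvMain (items : List Int) (k : Nat) (hk : k + 1 ≤ items.length) :
    ∃ (L : List (List Int)) (P : List String) (p : Nat),
      (PySem.List.pyRange 1 ((k : Int) + 1) 1).foldl (pvStepA0 items) ([], 0) = (L, (p : Int)) ∧
      ((items.tail).take k).foldl pvStepB ([], items.getD 0 0, items.getD 0 0)
        = (P, items.getD p 0, items.getD k 0) ∧
      L.map pvFmtA = P.map (· ++ ",") ∧
      p ≤ k ∧
      items.getD k 0 = items.getD p 0 + ((k : Int) - (p : Int)) := by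
  induction k with
  | zero =>
    refine ⟨[], [], 0, ?_, ?_, rfl, le_refl 0, by simp⟩
    · rw [PySem.List.pyRange_one_eq_nil (by norm_num)]; rfl
    · simp
  | succ k ih =>
    obtain ⟨L, P, p, hA, hB, hmap, hpk, hrun⟩ := ih (by omega)
    have hcast : ((k : Int) + 1 + 1) = (((k + 1 : Nat) : Int) + 1) := by push_cast; ring
    have hrange : PySem.List.pyRange 1 (((k + 1 : Nat) : Int) + 1) 1
        = PySem.List.pyRange 1 ((k : Int) + 1) 1 ++ [(k : Int) + 1] := by
      rw [← hcast, PySem.List.pyRange_one_succ_right (by omega)]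
    have hgk : PySem.List.pyGetD items ((k : Int) + 1 - 1) 0 = items.getD k 0 := by
      have : ((k : Int) + 1 - 1) = (k : Int) := by ring
      rw [this, PySem.List.pyGetD_natCast]
    have hgk1 : PySem.List.pyGetD items ((k : Int) + 1) 0 = items.getD (k + 1) 0 := by
      have : ((k : Int) + 1) = ((k + 1 : Nat) : Int) := by push_cast; ring
      rw [this, PySem.List.pyGetD_natCast]
    have htk : (items.tail).take (k + 1) = (items.tail).take k ++ [items.getD (k + 1) 0] := by
      rw [List.take_add_one]
      congr 1
      have h1 : (items.tail)[k]? = items[k + 1]? := by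
        cases items with
        | nil => simp at hk
        | cons a t => simp
      rw [h1, List.getElem?_eq_getElem (by omega)]
      simp [List.getD_eq_getElem?_getD, List.getElem?_eq_getElem (show k + 1 < items.length by omega)]
    rw [hrange, List.foldl_append, hA, List.foldl_cons, List.foldl_nil,
        htk, List.foldl_append, hB, List.foldl_cons, List.foldl_nil]
    by_cases hb : items.getD (k + 1) 0 = items.getD k 0 + 1
    · -- run continues: no boundary on either side
      refine ⟨L, P, p, ?_, ?_, hmap, by omega, by rw [hb, hrun]; push_cast; ring⟩
      · rw [pvStepA0, if_neg (by rw [hgk, hgk1]; simp only [ne_eq, not_not]; omega)]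
      · rw [pvStepB]; simp only [ne_eq]; rw [if_neg (by simp only [not_not]; exact hb)]
    · -- boundary: both sides close the current run
      refine ⟨L ++ [PySem.List.slice items (some (p : Int)) (some ((k : Int) + 1))],
              P ++ [pvPartB (items.getD p 0) (items.getD k 0)], k + 1, ?_, ?_, ?_, le_refl _,
              by push_cast; ring⟩
      · rw [pvStepA0, if_pos (by rw [hgk, hgk1]; omega)]
        push_cast; rfl
      · rw [pvStepB]; simp only [ne_eq]; rw [if_pos hb]
      · have hslice : PySem.List.slice items (some (p : Int)) (some ((k : Int) + 1))
            = (items.drop p).take (k + 1 - p) := by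
          have : ((k : Int) + 1) = ((k + 1 : Nat) : Int) := by push_cast; ring
          rw [this, PySem.List.slice_natCast]
        rw [List.map_append, List.map_append, hmap, hslice, List.map_singleton, List.map_singleton,
            pvFmt_run items p k hpk (by omega) hrun]

-- A's whole first loop, with the final-append branch split off the last iteration
lemma pvAfold (items : List Int) (m : Nat) (hlen : items.length = m + 2) :
    (PySem.List.pyRange 1 (items.length : Int) 1).foldl
      (fun (s : List (List Int) × Int) i =>
        let s1 := if PySem.List.pyGetD items (i - 1) 0 ≠ PySem.List.pyGetD items i 0 - 1
                  then (s.1 ++ [PySem.List.slice items (some s.2) (some i)], i)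
                  else s
        if i == (items.length : Int) - 1
        then (s1.1 ++ [PySem.List.slice items (some s1.2) none], s1.2)
        else s1) ([], 0)
    = (let s1 := (PySem.List.pyRange 1 (((m + 1 : Nat) : Int) + 1) 1).foldl (pvStepA0 items) ([], 0)
       (s1.1 ++ [PySem.List.slice items (some s1.2) none], s1.2)) := by
  have hsplit : PySem.List.pyRange 1 (items.length : Int) 1
      = PySem.List.pyRange 1 (((m + 1 : Nat) : Int)) 1 ++ [((m + 1 : Nat) : Int)] := by
    rw [hlen]
    have : (((m + 2 : Nat)) : Int) = (((m + 1 : Nat) : Int)) + 1 := by push_cast; ring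
    rw [this, PySem.List.pyRange_one_succ_right (by push_cast; omega)]
  have hsplit' : PySem.List.pyRange 1 (((m + 1 : Nat) : Int) + 1) 1
      = PySem.List.pyRange 1 (((m + 1 : Nat) : Int)) 1 ++ [((m + 1 : Nat) : Int)] := by
    rw [PySem.List.pyRange_one_succ_right (by push_cast; omega)]
  have hcongr : (PySem.List.pyRange 1 (((m + 1 : Nat) : Int)) 1).foldl
      (fun (s : List (List Int) × Int) i =>
        let s1 := if PySem.List.pyGetD items (i - 1) 0 ≠ PySem.List.pyGetD items i 0 - 1
                  then (s.1 ++ [PySem.List.slice items (some s.2) (some i)], i)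
                  else s
        if i == (items.length : Int) - 1
        then (s1.1 ++ [PySem.List.slice items (some s1.2) none], s1.2)
        else s1) ([], 0)
      = (PySem.List.pyRange 1 (((m + 1 : Nat) : Int)) 1).foldl (pvStepA0 items) ([], 0) := by
    refine PySem.List.foldl_congr_mem _ _ _ _ ?_
    intro acc i hi
    have hmem := PySem.List.mem_pyRange_one.mp hi
    have hne : (i == (items.length : Int) - 1) = false := by
      simp only [beq_eq_false_iff_ne, ne_eq, hlen]
      push_cast at hmem ⊢; omega
    simp only [hne, Bool.false_eq_true, if_false]
    rfl
  have hlast : ((((m + 1 : Nat) : Int)) == (items.length : Int) - 1) = true := by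
    simp only [beq_iff_eq, hlen]; push_cast; ring
  rw [hsplit, hsplit', List.foldl_append, List.foldl_append, hcongr,
      List.foldl_cons, List.foldl_cons, List.foldl_nil, List.foldl_nil]
  simp only [hlast, if_true, pvStepA0]

lemma pvFoldlStr (L : List String) (a : String) :
    (L.foldl (· ++ ·) a).toList = a.toList ++ (L.map String.toList).flatten := by
  induction L generalizing a with
  | nil => simp
  | cons s t ih => simp [List.foldl_cons, ih]

lemma pvFlatten_comma (Q : List (List Char)) (q : List Char) :
    ((Q ++ [q]).map (fun l => l ++ [','])).flatten = PySem.Chars.join [','] (Q ++ [q]) ++ [','] := by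
  induction Q with
  | nil => simp [PySem.Chars.join_singleton]
  | cons a Q' ih =>
    cases h : Q' ++ [q] with
    | nil => simp at h
    | cons y ys =>
      rw [List.cons_append, h, List.map_cons, List.flatten_cons, ← h, ih, h,
        PySem.Chars.join_cons_cons]
      simp

-- dropping the trailing comma of A's concatenation is exactly B's ','-join
lemma pvJoin_comma (Q : List String) (q : String) :
    PySem.Str.slice (((Q ++ [q]).map (· ++ ",")).foldl (· ++ ·) "") none (some (-1)) =
      PySem.Str.join "," (Q ++ [q]) := by
  apply String.toList_inj.mp
  rw [PySem.Str.slice_to_neg_one, pvFoldlStr, PySem.Str.toList_join]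
  have h1 : ((Q ++ [q]).map (· ++ ",")).map String.toList
      = ((Q ++ [q]).map String.toList).map (fun l => l ++ [',']) := by
    simp [List.map_map]
  have h2 : (Q ++ [q]).map String.toList = Q.map String.toList ++ [q.toList] := by simp
  rw [h1, h2, pvFlatten_comma]
  simp

lemma pvJoin_single (s : String) : PySem.Str.join "," [s] = s := by
  apply String.toList_inj.mp
  rw [PySem.Str.toList_join]
  simp [PySem.Chars.join_singleton]

-- ===== VERDICT (by name: the statement is the Claim_ definition above) =====
theorem collapse_intervals_spec : Claim_equal_collapse_intervals := by
  intro items _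
  unfold Spec_collapse_intervals
  match items with
  | [] => rfl
  | [x0] =>
    show collapse_intervals [x0] = _
    rw [collapse_intervals, if_pos (by rfl)]
    show _ = PySem.Str.join "," ([] ++ [pvPartB x0 x0])
    rw [List.nil_append, pvPartB, if_neg (by simp), pvJoin_single]
    rfl
  | x0 :: y :: t =>
    set items := x0 :: y :: t with hitems
    set m := t.length with hm
    have hlen : items.length = m + 2 := by simp [hitems, hm]
    obtain ⟨L, P, p, hA, hB, hmap, hpk, hrun⟩ := pvMain items (m + 1) (by omega)
    -- A's side
    rw [collapse_intervals, if_neg (by simp [hlen]), pvAfold items m hlen, hA]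
    have htail : (items.tail).take (m + 1) = y :: t := by
      simp [hitems, hm]
    have hfinal : PySem.List.slice items (some ((p : Nat) : Int)) none
        = (items.drop p).take (m + 1 + 1 - p) := by
      rw [PySem.List.slice_from_natCast]
      rw [List.take_of_length_le (by simp [List.length_drop]; omega)]
    have hfmt : pvFmtA ((items.drop p).take (m + 1 + 1 - p))
        = pvPartB (items.getD p 0) (items.getD (m + 1) 0) ++ "," := by
      exact pvFmt_run items p (m + 1) hpk (by omega) hrun
    show PySem.Str.slice ((L ++ [PySem.List.slice items (some ((p : Nat) : Int)) none]).foldl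
        (fun (r : String) interval => r ++ pvFmtA interval) "") none (some (-1)) = _
    rw [← List.foldl_map (f := pvFmtA) (g := fun (r s : String) => r ++ s),
        List.map_append, hmap, List.map_singleton, hfinal, hfmt]
    have hmapc : (P.map (· ++ ",") ++ [pvPartB (items.getD p 0) (items.getD (m + 1) 0) ++ ","])
        = ((P ++ [pvPartB (items.getD p 0) (items.getD (m + 1) 0)]).map (· ++ ",")) := by
      simp
    rw [hmapc, pvJoin_comma]
    -- B's side
    show _ = collapse_intervals_alt items
    rw [hitems, collapse_intervals_alt]
    have hstep : (y :: t).foldl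
        (fun (s : List String × Int × Int) x =>
          let s1 := if x ≠ s.2.2 + 1 then (s.1 ++ [pvPartB s.2.1 s.2.2], x) else (s.1, s.2.1)
          (s1.1, s1.2, x)) ([], x0, x0)
        = (P, items.getD p 0, items.getD (m + 1) 0) := by
      have hinit : (([], x0, x0) : List String × Int × Int)
          = ([], items.getD 0 0, items.getD 0 0) := by simp [hitems]
      rw [hinit, show (y :: t) = (items.tail).take (m + 1) from htail.symm]
      exact hB
    rw [hstep]
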